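-- pv_equiv track=rewrite | github.com/Leviticus-Triage/cerebro-red-v2 | backend/scripts/generate_api_docs.py | merge_manual_sections
-- ===== SOURCE A (Python) =====
-- from typing import Dict, List, Any, Optional
--
-- def merge_manual_sections(generated_doc: str, manual_sections: Dict[str, str]) -> str:
--     """
--     Merge manual sections into generated documentation.
--
--     Replaces or inserts manual sections at appropriate locations.
--     """
--     lines = generated_doc.split('\n')
--     output = []
--     i = 0
--
--     while i < len(lines):
--         line = lines[i]
--
--         # Check if this is a section header we want to replace
--         if line.startswith('## '):
--             section_name = line[3:].strip()
--
--             # Check if we have a manual section for this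
--             if section_name in manual_sections:
--                 # Replace with manual section
--                 output.append(line)
--                 output.append('')
--                 output.append(manual_sections[section_name])
--                 output.append('')
--                 output.append('---')
--                 output.append('')
--
--                 # Skip the generated content for this section until next ## or ---
--                 i += 1
--                 while i < len(lines):
--                     if lines[i].startswith('## ') or (lines[i].strip() == '---' and i > 0):
--                         i -= 1  # Back up to process this line
--                         break
--                     i += 1
--                 i += 1
--                 continue
--
--         output.append(line)
--         i += 1
--
--     return '\n'.join(output)
-- ===== SOURCE B (Python) =====
-- def merge_manual_sections(generated_doc: str, manual_sections: dict) -> str: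
--     """Right-to-left fold: build (pending run, rendered rest) from the end of the doc."""
--     pending, done = [], []
--     for line in reversed(generated_doc.split('\n')):
--         if line.startswith('## ') or line.strip() == '---':
--             name = line[3:].strip()
--             if line.startswith('## ') and name in manual_sections:
--                 chunk = [line, '', manual_sections[name], '', '---', '']
--             else:
--                 chunk = [line] + pending
--             pending, done = [], chunk + done
--         else:
--             pending = [line] + pending
--     return '\n'.join(pending + done)
-- ===== Notes on version B (the rewrite author's own statement) =====
-- stated objective: alternative
-- what changed: Replaced A's forward index machine with a nested skip-ahead/back-up loop by a right-to-left fold maintaining (pending run of ordinary lines, rendered rest): each boundary line closes the pending run into a chunk and renders it, so no index arithmetic or skipping state is needed.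
import Mathlib
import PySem

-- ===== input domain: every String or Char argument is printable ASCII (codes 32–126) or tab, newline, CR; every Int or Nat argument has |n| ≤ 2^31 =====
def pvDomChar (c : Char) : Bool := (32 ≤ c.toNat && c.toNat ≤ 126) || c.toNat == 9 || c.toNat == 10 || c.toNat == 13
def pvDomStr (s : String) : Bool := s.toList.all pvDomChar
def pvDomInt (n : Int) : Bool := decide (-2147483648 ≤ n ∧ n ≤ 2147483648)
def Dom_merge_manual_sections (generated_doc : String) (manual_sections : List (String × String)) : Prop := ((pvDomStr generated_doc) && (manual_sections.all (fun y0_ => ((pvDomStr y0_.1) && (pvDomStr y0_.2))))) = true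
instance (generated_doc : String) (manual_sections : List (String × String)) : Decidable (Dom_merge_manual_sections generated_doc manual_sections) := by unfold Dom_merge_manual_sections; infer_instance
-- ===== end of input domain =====

-- B replaces A's forward index machine (nested skip-ahead / back-up-one loop) by a right-to-left fold
-- maintaining (pending run of ordinary lines, rendered rest) — a different traversal order (objective: alternative).

-- ===== PORT A =====
-- generated_doc.split('\n') as a list of Strings
def pvSplitNL (s : String) : List String := (PySem.Chars.splitOn s.toList ['\n']).map String.ofList

-- inner while loop: scan from i for the next line starting '## ' or stripping to '---' (with i > 0), return that index minus 1; if none, return lines.length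
def pvInnerA (lines : List String) (i : Nat) : Nat :=
  if h : i < lines.length then
    if PySem.Str.startswith lines[i] "## " || (PySem.Str.strip lines[i] == "---" && decide (0 < i)) then
      i - 1
    else
      pvInnerA lines (i + 1)
  else i
termination_by lines.length - i

-- the inner loop never returns an index below i - 1 (cited by pvLoopA's decreasing_by)
theorem pvInnerA_ge (lines : List String) (i : Nat) : i ≤ pvInnerA lines i + 1 := by
  unfold pvInnerA
  split
  · split
    · omega
    · have := pvInnerA_ge lines (i + 1); omega
  · omega
termination_by lines.length - i

-- outer while loop of A
def pvLoopA (lines : List String) (d : PySem.Dict String String) (i : Nat) (output : List String) : List String :=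
  if h : i < lines.length then
    let line := lines[i]
    if PySem.Str.startswith line "## " then
      let section_name := PySem.Str.strip (PySem.Str.slice line (some 3) none)
      if d.contains section_name then
        pvLoopA lines d (pvInnerA lines (i + 1) + 1)
          (output ++ [line, "", d.getD section_name "", "", "---", ""])
      else
        pvLoopA lines d (i + 1) (output ++ [line])
    else
      pvLoopA lines d (i + 1) (output ++ [line])
  else output
termination_by lines.length - i
decreasing_by
  · have := pvInnerA_ge lines (i + 1); omega
  · omega
  · omega

def merge_manual_sections (generated_doc : String) (manual_sections : List (String × String)) : String :=
  PySem.Str.join "\n" (pvLoopA (pvSplitNL generated_doc) (PySem.Dict.ofList manual_sections) 0 [])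

-- ===== PORT B =====
-- boundary test: line.startswith('## ') or line.strip() == '---'
def pvBoundary (line : String) : Bool :=
  PySem.Str.startswith line "## " || PySem.Str.strip line == "---"

-- body of B's loop over reversed(lines): state = (pending, done)
def pvStepB (d : PySem.Dict String String) (line : String) (st : List String × List String) :
    List String × List String :=
  if pvBoundary line then
    let name := PySem.Str.strip (PySem.Str.slice line (some 3) none)
    let chunk := if PySem.Str.startswith line "## " && d.contains name then
        [line, "", d.getD name "", "", "---", ""]
      else line :: st.1
    ([], chunk ++ st.2)
  else (line :: st.1, st.2)

def merge_manual_sections_alt (generated_doc : String) (manual_sections : List (String × String)) : String :=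
  PySem.Str.join "\n"
    (((pvSplitNL generated_doc).foldr (pvStepB (PySem.Dict.ofList manual_sections)) ([], [])).1
      ++ ((pvSplitNL generated_doc).foldr (pvStepB (PySem.Dict.ofList manual_sections)) ([], [])).2)

-- ===== PRECONDITION & SPEC =====
def Spec_merge_manual_sections (generated_doc : String) (manual_sections : List (String × String)) (out : String) : Prop := out = merge_manual_sections_alt generated_doc manual_sections
instance (generated_doc : String) (manual_sections : List (String × String)) (out : String) : Decidable (Spec_merge_manual_sections generated_doc manual_sections out) := by unfold Spec_merge_manual_sections; infer_instance

-- ===== CLAIM =====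
def Claim_equal_merge_manual_sections : Prop := ∀ (generated_doc : String) (manual_sections : List (String × String)), Dom_merge_manual_sections generated_doc manual_sections → Spec_merge_manual_sections generated_doc manual_sections (merge_manual_sections generated_doc manual_sections)

-- ===== LEMMAS AND PROOFS =====

-- both programs produce, per maximal chunk starting at a boundary, this rendering
def pvRender (d : PySem.Dict String String) (c : List String) : List String :=
  match c with
  | [] => []
  | h :: t =>
    if PySem.Str.startswith h "## " && d.contains (PySem.Str.strip (PySem.Str.slice h (some 3) none)) then
      [h, "", d.getD (PySem.Str.strip (PySem.Str.slice h (some 3) none)) "", "", "---", ""]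
    else h :: t

-- split the lines into chunks at boundary lines
def pvChunks (l : List String) : List (List String) :=
  match l with
  | [] => []
  | x :: xs =>
    (x :: xs.takeWhile (fun s => !pvBoundary s)) :: pvChunks (xs.dropWhile (fun s => !pvBoundary s))
termination_by l.length
decreasing_by
  have := List.length_dropWhile_le (fun s => !pvBoundary s) xs
  simp; omega

def pvF (d : PySem.Dict String String) (l : List String) : List String :=
  ((pvChunks l).map (pvRender d)).flatten

theorem pvChunks_cons (x : String) (xs : List String) :
    pvChunks (x :: xs)
      = (x :: xs.takeWhile (fun s => !pvBoundary s)) :: pvChunks (xs.dropWhile (fun s => !pvBoundary s)) := by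
  rw [pvChunks]

theorem pvF_run (d : PySem.Dict String String) (l : List String) :
    pvF d l = l.takeWhile (fun s => !pvBoundary s) ++ pvF d (l.dropWhile (fun s => !pvBoundary s)) := by
  match l with
  | [] => simp
  | x :: xs =>
    by_cases hb : pvBoundary x = true
    · have h1 : (!pvBoundary x) = false := by rw [hb]; rfl
      rw [List.takeWhile_cons, List.dropWhile_cons, h1]
      simp
    · have hsw : PySem.Str.startswith x "## " = false := by
        cases hSW : PySem.Str.startswith x "## " with
        | false => rfl
        | true => exact absurd (by simp only [pvBoundary, hSW, Bool.true_or]) hb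
      have h1 : (!pvBoundary x) = true := by
        cases hB : pvBoundary x
        · rfl
        · exact absurd hB hb
      rw [List.takeWhile_cons, List.dropWhile_cons, h1]
      simp only [if_true]
      rw [pvF, pvChunks_cons, List.map_cons, List.flatten_cons]
      have hr : pvRender d (x :: xs.takeWhile (fun s => !pvBoundary s))
          = x :: xs.takeWhile (fun s => !pvBoundary s) := by
        simp only [pvRender, hsw, Bool.false_and, Bool.false_eq_true, if_false]
      rw [hr, ← pvF]

theorem pvF_cons_norep (d : PySem.Dict String String) (x : String) (xs : List String)
    (h : (PySem.Str.startswith x "## "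
        && d.contains (PySem.Str.strip (PySem.Str.slice x (some 3) none))) = false) :
    pvF d (x :: xs) = x :: pvF d xs := by
  rw [pvF, pvChunks_cons, List.map_cons, List.flatten_cons]
  have hr : pvRender d (x :: xs.takeWhile (fun s => !pvBoundary s))
      = x :: xs.takeWhile (fun s => !pvBoundary s) := by
    simp only [pvRender, h, Bool.false_eq_true, if_false]
  rw [hr, List.cons_append, ← pvF, ← pvF_run]

theorem pvF_cons_rep (d : PySem.Dict String String) (x : String) (xs : List String)
    (h1 : PySem.Str.startswith x "## " = true)
    (h2 : d.contains (PySem.Str.strip (PySem.Str.slice x (some 3) none)) = true) :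
    pvF d (x :: xs) = [x, "", d.getD (PySem.Str.strip (PySem.Str.slice x (some 3) none)) "", "", "---", ""]
        ++ pvF d (xs.dropWhile (fun s => !pvBoundary s)) := by
  rw [pvF, pvChunks_cons, List.map_cons, List.flatten_cons]
  have hr : pvRender d (x :: xs.takeWhile (fun s => !pvBoundary s))
      = [x, "", d.getD (PySem.Str.strip (PySem.Str.slice x (some 3) none)) "", "", "---", ""] := by
    simp only [pvRender, h1, h2, Bool.and_self, if_true]
  rw [hr, ← pvF]

-- A's inner scan lands exactly at the next boundary (the i > 0 guard is vacuous for i ≥ 1)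
theorem pvInner_drop (lines : List String) (i : Nat) (hi : 1 ≤ i) :
    lines.drop (pvInnerA lines i + 1) = (lines.drop i).dropWhile (fun s => !pvBoundary s) := by
  by_cases h : i < lines.length
  · have hdrop : lines.drop i = lines[i] :: lines.drop (i + 1) := List.drop_eq_getElem_cons h
    have hpos : decide (0 < i) = true := by simp; omega
    have hcond : (PySem.Str.startswith lines[i] "## "
        || (PySem.Str.strip lines[i] == "---" && decide (0 < i))) = pvBoundary lines[i] := by
      rw [hpos, Bool.and_true]; rfl
    rw [pvInnerA, dif_pos h, hcond]
    by_cases hb : pvBoundary lines[i] = true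
    · have h1 : (!pvBoundary lines[i]) = false := by rw [hb]; rfl
      rw [if_pos hb, Nat.sub_add_cancel hi, hdrop, List.dropWhile_cons, h1]
      simp
    · have h1 : (!pvBoundary lines[i]) = true := by
        cases hB : pvBoundary lines[i]
        · rfl
        · exact absurd hB hb
      rw [if_neg hb, hdrop, List.dropWhile_cons, h1]
      simp only [if_true]
      exact pvInner_drop lines (i + 1) (by omega)
  · rw [pvInnerA, dif_neg h]
    rw [List.drop_eq_nil_of_le (by omega), List.drop_eq_nil_of_le (by omega)]
    rfl
termination_by lines.length - i

-- A's outer loop computes the chunk rendering of the remaining lines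
theorem pvLoopA_eq (lines : List String) (d : PySem.Dict String String) (i : Nat) :
    ∀ out, pvLoopA lines d i out = out ++ pvF d (lines.drop i) := by
  intro out
  by_cases h : i < lines.length
  · have hdrop : lines.drop i = lines[i] :: lines.drop (i + 1) := List.drop_eq_getElem_cons h
    rw [pvLoopA, dif_pos h]
    by_cases hsw : PySem.Str.startswith lines[i] "## " = true
    · by_cases hct : d.contains (PySem.Str.strip (PySem.Str.slice lines[i] (some 3) none)) = true
      · simp only [hsw, hct, if_true]
        rw [pvLoopA_eq lines d (pvInnerA lines (i + 1) + 1)]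
        rw [pvInner_drop lines (i + 1) (by omega), hdrop,
          pvF_cons_rep d lines[i] (lines.drop (i + 1)) hsw hct]
        simp
      · have hct' : d.contains (PySem.Str.strip (PySem.Str.slice lines[i] (some 3) none)) = false := by
          cases hC : d.contains (PySem.Str.strip (PySem.Str.slice lines[i] (some 3) none))
          · rfl
          · exact absurd hC hct
        simp only [hsw, hct', if_true, Bool.false_eq_true, if_false]
        rw [pvLoopA_eq lines d (i + 1), hdrop,
          pvF_cons_norep d lines[i] (lines.drop (i + 1)) (by rw [hct', Bool.and_false])]
        simp
    · have hsw' : PySem.Str.startswith lines[i] "## " = false := by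
        cases hS : PySem.Str.startswith lines[i] "## "
        · rfl
        · exact absurd hS hsw
      simp only [hsw', Bool.false_eq_true, if_false]
      rw [pvLoopA_eq lines d (i + 1), hdrop,
        pvF_cons_norep d lines[i] (lines.drop (i + 1)) (by rw [hsw', Bool.false_and])]
      simp
  · rw [pvLoopA, dif_neg h, List.drop_eq_nil_of_le (by omega)]
    simp [pvF, pvChunks]
termination_by lines.length - i
decreasing_by
  · have := pvInnerA_ge lines (i + 1); omega
  · omega
  · omega

-- B's fold computes (leading run of ordinary lines, chunk rendering of the rest)
theorem pvFoldB_eq (d : PySem.Dict String String) (l : List String) :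
    l.foldr (pvStepB d) ([], [])
      = (l.takeWhile (fun s => !pvBoundary s), pvF d (l.dropWhile (fun s => !pvBoundary s))) := by
  match l with
  | [] => simp [pvF, pvChunks]
  | x :: xs =>
    rw [List.foldr_cons, pvFoldB_eq d xs]
    by_cases hb : pvBoundary x = true
    · have h1 : (!pvBoundary x) = false := by rw [hb]; rfl
      rw [List.takeWhile_cons, List.dropWhile_cons, h1]
      simp only [Bool.false_eq_true, if_false]
      rw [pvStepB, if_pos hb]
      by_cases h1' : PySem.Str.startswith x "## " = true
      · by_cases h2 : d.contains (PySem.Str.strip (PySem.Str.slice x (some 3) none)) = true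
        · simp only [h1', h2, Bool.and_self, if_true]
          rw [pvF_cons_rep d x xs h1' h2]
        · have h2' : d.contains (PySem.Str.strip (PySem.Str.slice x (some 3) none)) = false := by
            cases hC : d.contains (PySem.Str.strip (PySem.Str.slice x (some 3) none))
            · rfl
            · exact absurd hC h2
          simp only [h2', Bool.and_false, Bool.false_eq_true, if_false]
          rw [pvF_cons_norep d x xs (by rw [h2', Bool.and_false]), pvF_run d xs]
          simp
      · have h1'' : PySem.Str.startswith x "## " = false := by
          cases hS : PySem.Str.startswith x "## "
          · rfl
          · exact absurd hS h1'
        simp only [h1'', Bool.false_and, Bool.false_eq_true, if_false]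
        rw [pvF_cons_norep d x xs (by rw [h1'', Bool.false_and]), pvF_run d xs]
        simp
    · have h1 : (!pvBoundary x) = true := by
        cases hB : pvBoundary x
        · rfl
        · exact absurd hB hb
      rw [pvStepB, if_neg hb, List.takeWhile_cons, List.dropWhile_cons, h1]
      simp

-- ===== VERDICT =====
theorem merge_manual_sections_spec : Claim_equal_merge_manual_sections := by
  intro g m _
  unfold Spec_merge_manual_sections merge_manual_sections merge_manual_sections_alt
  rw [pvLoopA_eq (pvSplitNL g) (PySem.Dict.ofList m) 0 [], pvFoldB_eq, List.drop_zero,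
    List.nil_append]
  exact congrArg _ (pvF_run _ _)
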